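-- pv_equiv track=rewrite | github.com/stumash/AlgorithmChallenges | leetcode/0036/sol.py | isValidSudokuGroup
-- ===== SOURCE A (Python) =====
-- from typing import List
-- from collections import defaultdict
--
-- def isValidSudokuGroup(cells: List[str]) -> bool:
--     d = defaultdict(int)
--     for cell in cells:
--         d[cell] += 1
--     for k,v in d.items():
--         if k != '.' and v > 1:
--             return False
--     return True
-- ===== SOURCE B (Python) =====
-- from typing import List
--
-- def isValidSudokuGroup(cells: List[str]) -> bool:
--     s = sorted(c for c in cells if c != '.')
--     return all(x != y for x, y in zip(s, s[1:]))
-- ===== Notes on version B (the rewrite author's own statement) =====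
-- stated objective: alternative
-- what changed: Replaces A's count-dictionary build plus a second scan over its items with a sort of the non-'.' cells followed by a single adjacent-pair comparison: duplicates, if any, become neighbours after sorting, so no per-key counts are maintained at all.
import Mathlib
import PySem

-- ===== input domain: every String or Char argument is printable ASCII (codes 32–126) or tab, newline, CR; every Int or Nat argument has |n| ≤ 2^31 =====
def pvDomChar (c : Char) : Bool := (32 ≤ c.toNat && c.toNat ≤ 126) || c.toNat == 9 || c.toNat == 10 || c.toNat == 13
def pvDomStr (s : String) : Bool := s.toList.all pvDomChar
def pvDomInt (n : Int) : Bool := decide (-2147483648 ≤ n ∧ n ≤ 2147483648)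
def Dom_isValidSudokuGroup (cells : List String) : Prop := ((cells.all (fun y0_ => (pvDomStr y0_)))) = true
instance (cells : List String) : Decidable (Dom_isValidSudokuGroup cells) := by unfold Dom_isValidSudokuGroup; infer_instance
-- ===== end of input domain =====

-- B replaces A's count-dict plus duplicate scan by sorting the non-'.' cells and
-- comparing adjacent pairs (objective: alternative algorithm, no counts maintained).

-- ===== PORT A =====
-- the second loop of A: early return False on a non-'.' key counted more than once
def pvCheckItems : List (String × Int) → Bool
  | [] => true
  | (k, v) :: rest => if k ≠ "." ∧ v > 1 then false else pvCheckItems rest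

def isValidSudokuGroup (cells : List String) : Bool :=
  let d := cells.foldl (fun d cell => d.modify cell 0 (· + 1)) PySem.Dict.empty
  pvCheckItems d.items

-- ===== PORT B =====
def isValidSudokuGroup_alt (cells : List String) : Bool :=
  let s := PySem.List.sorted (cells.filter (fun c => c != ".")) (fun x => x) false
  (s.zip (PySem.List.slice s (some 1) none)).all (fun p => p.1 != p.2)

-- ===== PRECONDITION & SPEC =====
def Spec_isValidSudokuGroup (cells : List String) (out : Bool) : Prop := out = isValidSudokuGroup_alt cells
instance (cells : List String) (out : Bool) : Decidable (Spec_isValidSudokuGroup cells out) := by unfold Spec_isValidSudokuGroup; infer_instance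

-- ===== CLAIM (what is proved, stated in full; the proofs are below) =====
def Claim_equal_isValidSudokuGroup : Prop := ∀ (cells : List String), Dom_isValidSudokuGroup cells → Spec_isValidSudokuGroup cells (isValidSudokuGroup cells)

-- ===== LEMMAS AND PROOFS =====

-- A's early-return scan is List.all of the negated condition
theorem pvCheckItems_eq_all (l : List (String × Int)) :
    pvCheckItems l = l.all (fun p => !(decide (p.1 ≠ "." ∧ p.2 > 1))) := by
  induction l with
  | nil => rfl
  | cons p rest ih =>
    obtain ⟨k, v⟩ := p
    by_cases h : k ≠ "." ∧ v > 1
    · simp [pvCheckItems, h]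
    · rw [show pvCheckItems ((k, v) :: rest)
            = if k ≠ "." ∧ v > 1 then false else pvCheckItems rest from rfl, if_neg h, ih]
      rw [List.all_cons, decide_eq_false h, Bool.not_false, Bool.true_and]

-- A computes Nodup of the non-'.' cells
theorem a_eq_nodup (cells : List String) :
    isValidSudokuGroup cells =
      decide (cells.filter (fun c => c != ".")).Nodup := by
  have hstep : isValidSudokuGroup cells
      = pvCheckItems (PySem.Dict.counter cells).items := rfl
  rw [hstep, PySem.Dict.items_counter, pvCheckItems_eq_all, Bool.eq_iff_iff]
  simp only [List.all_map, List.all_eq_true, Function.comp_apply, Bool.not_eq_true',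
    decide_eq_false_iff_not, not_and, not_lt, decide_eq_true_iff, ne_eq]
  constructor
  · intro h
    rw [List.nodup_iff_count_le_one]
    intro a
    by_cases ha : a ∈ cells.filter (fun c => c != ".")
    · have hmem : a ∈ cells := (List.mem_filter.mp ha).1
      have hne : a ≠ "." := by simpa using (List.mem_filter.mp ha).2
      have hcl := h a ((PySem.Set.mem_ofList _ _).mpr hmem)
      have hcount : (cells.filter (fun c => c != ".")).count a ≤ cells.count a :=
        (List.filter_sublist (l := cells)).count_le a
      have hv := hcl hne
      omega
    · simp [List.count_eq_zero.mpr ha]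
  · intro hnd k hk hne
    have hkmem : k ∈ cells := (PySem.Set.mem_ofList _ _).mp hk
    have hcf : (cells.filter (fun c => c != ".")).count k = cells.count k := by
      rw [List.count_filter]
      simp [hne]
    have hle1 := (List.nodup_iff_count_le_one.mp hnd) k
    rw [hcf] at hle1
    omega

-- the adjacent-pair scan is IsChain (· ≠ ·)
theorem zip_tail_all_ne (l : List String) :
    (l.zip l.tail).all (fun p => p.1 != p.2) = decide (l.IsChain (· ≠ ·)) := by
  induction l with
  | nil => rfl
  | cons a t ih =>
    cases t with
    | nil => simp
    | cons b t' =>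
      simp only [List.tail_cons, List.zip_cons_cons, List.all_cons, List.isChain_cons_cons] at ih ⊢
      rw [ih]
      by_cases hab : a = b
      · simp [hab]
      · simp [hab]

-- adjacent distinctness plus adjacent order gives adjacent strict order
theorem chain_lt_of_ne_le {l : List String}
    (h1 : l.IsChain (· ≠ ·)) (h2 : l.IsChain (· ≤ ·)) : l.IsChain (· < ·) := by
  induction l with
  | nil => exact List.isChain_nil
  | cons a t ih =>
    cases t with
    | nil => exact List.isChain_singleton a
    | cons b t' =>
      rw [List.isChain_cons_cons] at h1 h2 ⊢
      exact ⟨lt_of_le_of_ne h2.1 h1.1, ih h1.2 h2.2⟩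

-- on a ≤-sorted list, adjacent distinctness is exactly Nodup
theorem chain_ne_iff_nodup {l : List String}
    (hpw : l.Pairwise (· ≤ ·)) : l.IsChain (· ≠ ·) ↔ l.Nodup := by
  constructor
  · intro hc
    have hlt : l.IsChain (· < ·) := chain_lt_of_ne_le hc hpw.isChain
    exact (List.isChain_iff_pairwise.mp hlt).imp ne_of_lt
  · intro hnd
    exact List.Pairwise.isChain hnd

-- B computes Nodup of the non-'.' cells too
theorem alt_eq_nodup (cells : List String) :
    isValidSudokuGroup_alt cells =
      decide (cells.filter (fun c => c != ".")).Nodup := by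
  have hperm : (PySem.List.sorted (cells.filter (fun c => c != ".")) (fun x => x) false).Perm
      (cells.filter (fun c => c != ".")) :=
    PySem.List.sorted_perm (cells.filter (fun c => c != ".")) (fun x => x) false
  have hpw : (PySem.List.sorted (cells.filter (fun c => c != ".")) (fun x => x) false).Pairwise
      (· ≤ ·) := by
    have := PySem.List.sorted_pairwise (xs := cells.filter (fun c => c != "."))
      (key := fun x => x)
    simpa using this
  show ((PySem.List.sorted (cells.filter (fun c => c != ".")) (fun x => x) false).zip
      (PySem.List.slice (PySem.List.sorted (cells.filter (fun c => c != ".")) (fun x => x) false)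
        (some 1) none)).all (fun p => p.1 != p.2) = _
  rw [PySem.List.slice_from_one, zip_tail_all_ne, decide_eq_decide,
    chain_ne_iff_nodup hpw]
  exact hperm.nodup_iff

-- ===== VERDICT (by name: the statement is the Claim_ definition above) =====
theorem isValidSudokuGroup_spec : Claim_equal_isValidSudokuGroup := by
  intro cells _
  unfold Spec_isValidSudokuGroup
  rw [a_eq_nodup, alt_eq_nodup]
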